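-- pv_equiv track=rewrite | github.com/max2413/arpg-python | game/ui/widgets.py | build_grid_slot_defs
-- ===== SOURCE A (Python) =====
-- def build_grid_slot_defs(cols, rows, slot_size, slot_gap, origin_x, origin_z):
--     slot_defs = []
--     for i in range(cols * rows):
--         col = i % cols
--         row = i // cols
--         slot_defs.append(
--             {
--                 "key": i,
--                 "x": origin_x + col * (slot_size + slot_gap),
--                 "z": origin_z - row * (slot_size + slot_gap),
--             }
--         )
--     return slot_defs
-- ===== SOURCE B (Python) =====
-- def build_grid_slot_defs(cols, rows, slot_size, slot_gap, origin_x, origin_z):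
--     if cols <= 0 or rows <= 0:
--         return []
--     pitch = slot_size + slot_gap
--
--     def slots():
--         key = 0
--         for row in range(rows):
--             z = origin_z - row * pitch
--             for col in range(cols):
--                 yield {"key": key, "x": origin_x + col * pitch, "z": z}
--                 key += 1
--
--     return list(slots())
-- ===== Notes on version B (the rewrite author's own statement) =====
-- stated objective: simpler
-- what changed: Replaces the flat loop over range(cols*rows) with its modulo/floor-division index decoding by two nested row/col loops and a running key counter.
-- intended difference: When both cols and rows are negative, A's range(cols*rows) is non-empty and it returns cols*rows slot dicts with meaningless negatively-decoded coordinates, while B returns the empty list, which is the intended result for a grid with negative dimensions. — e.g. on build_grid_slot_defs(-1, -1, -1, -1, -1, -1): A returns [[("key", 0), ("x", -1), ("z", -1)]], B returns []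
import Mathlib
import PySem

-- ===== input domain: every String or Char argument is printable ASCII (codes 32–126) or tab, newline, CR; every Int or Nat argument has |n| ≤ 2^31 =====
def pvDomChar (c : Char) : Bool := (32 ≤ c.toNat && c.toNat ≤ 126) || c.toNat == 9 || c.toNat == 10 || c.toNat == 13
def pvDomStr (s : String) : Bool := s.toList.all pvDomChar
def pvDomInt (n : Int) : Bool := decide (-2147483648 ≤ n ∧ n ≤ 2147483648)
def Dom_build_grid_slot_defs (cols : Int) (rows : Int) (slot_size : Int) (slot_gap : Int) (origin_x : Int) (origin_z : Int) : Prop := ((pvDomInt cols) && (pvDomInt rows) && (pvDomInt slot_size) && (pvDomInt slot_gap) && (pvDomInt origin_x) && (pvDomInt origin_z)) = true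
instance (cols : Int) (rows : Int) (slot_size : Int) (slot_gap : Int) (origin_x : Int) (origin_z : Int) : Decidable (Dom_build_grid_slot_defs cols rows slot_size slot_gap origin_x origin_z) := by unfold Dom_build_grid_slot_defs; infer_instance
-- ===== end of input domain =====

-- B replaces the flat range(cols*rows) loop and its %/ // index decoding with nested
-- row/col loops and a running key counter (objective: simpler); on negative×negative
-- dimensions B returns the empty list where A returns garbage slots (see D_ below).

-- ===== PORT A =====
def build_grid_slot_defs (cols : Int) (rows : Int) (slot_size : Int) (slot_gap : Int) (origin_x : Int) (origin_z : Int) : List (List (String × Int)) :=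
  (PySem.List.pyRange 0 (cols * rows) 1).foldl
    (fun slot_defs i =>
      let col := PySem.Int.mod i cols
      let row := PySem.Int.floordiv i cols
      slot_defs ++ [[("key", i),
                     ("x", origin_x + col * (slot_size + slot_gap)),
                     ("z", origin_z - row * (slot_size + slot_gap))]])
    []

-- ===== PORT B =====
def build_grid_slot_defs_alt (cols : Int) (rows : Int) (slot_size : Int) (slot_gap : Int) (origin_x : Int) (origin_z : Int) : List (List (String × Int)) :=
  if cols ≤ 0 ∨ rows ≤ 0 then [] else
  let pitch := slot_size + slot_gap
  let st :=
    (PySem.List.pyRange 0 rows 1).foldl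
      (fun st row =>
        (PySem.List.pyRange 0 cols 1).foldl
          (fun st col =>
            (st.1 ++ [[("key", st.2),
                       ("x", origin_x + col * pitch),
                       ("z", origin_z - row * pitch)]], st.2 + 1))
          st)
      (([] : List (List (String × Int))), (0 : Int))
  st.1

-- ===== PRECONDITION & SPEC =====
-- When both cols and rows are negative, A's range(cols*rows) is non-empty and it returns
-- cols*rows slot dicts with meaningless negatively-decoded coordinates, while B returns the
-- empty list, which is the intended result for a grid with negative dimensions.
def D_build_grid_slot_defs (cols : Int) (rows : Int) (slot_size : Int) (slot_gap : Int) (origin_x : Int) (origin_z : Int) : Prop := cols < 0 ∧ rows < 0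
instance (cols : Int) (rows : Int) (slot_size : Int) (slot_gap : Int) (origin_x : Int) (origin_z : Int) : Decidable (D_build_grid_slot_defs cols rows slot_size slot_gap origin_x origin_z) := by unfold D_build_grid_slot_defs; infer_instance

def Spec_build_grid_slot_defs (cols : Int) (rows : Int) (slot_size : Int) (slot_gap : Int) (origin_x : Int) (origin_z : Int) (out : List (List (String × Int))) : Prop := ¬ D_build_grid_slot_defs cols rows slot_size slot_gap origin_x origin_z → out = build_grid_slot_defs_alt cols rows slot_size slot_gap origin_x origin_z
instance (cols : Int) (rows : Int) (slot_size : Int) (slot_gap : Int) (origin_x : Int) (origin_z : Int) (out : List (List (String × Int))) : Decidable (Spec_build_grid_slot_defs cols rows slot_size slot_gap origin_x origin_z out) := by unfold Spec_build_grid_slot_defs; infer_instance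

def pvDiffWitness_build_grid_slot_defs : Int × Int × Int × Int × Int × Int := (-1, -1, -1, -1, -1, -1)
def pvDiffWitnessOut_build_grid_slot_defs : (List (List (String × Int))) × (List (List (String × Int))) :=
  ([[("key", 0), ("x", -1), ("z", -1)]], [])

-- ===== CLAIM (what is proved, stated in full; the proofs are below) =====
def Claim_unchanged_build_grid_slot_defs : Prop := ∀ (cols : Int) (rows : Int) (slot_size : Int) (slot_gap : Int) (origin_x : Int) (origin_z : Int), Dom_build_grid_slot_defs cols rows slot_size slot_gap origin_x origin_z → Spec_build_grid_slot_defs cols rows slot_size slot_gap origin_x origin_z (build_grid_slot_defs cols rows slot_size slot_gap origin_x origin_z)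
def Claim_changed_build_grid_slot_defs : Prop := Dom_build_grid_slot_defs (pvDiffWitness_build_grid_slot_defs.1) (pvDiffWitness_build_grid_slot_defs.2.1) (pvDiffWitness_build_grid_slot_defs.2.2.1) (pvDiffWitness_build_grid_slot_defs.2.2.2.1) (pvDiffWitness_build_grid_slot_defs.2.2.2.2.1) (pvDiffWitness_build_grid_slot_defs.2.2.2.2.2) ∧ D_build_grid_slot_defs (pvDiffWitness_build_grid_slot_defs.1) (pvDiffWitness_build_grid_slot_defs.2.1) (pvDiffWitness_build_grid_slot_defs.2.2.1) (pvDiffWitness_build_grid_slot_defs.2.2.2.1) (pvDiffWitness_build_grid_slot_defs.2.2.2.2.1) (pvDiffWitness_build_grid_slot_defs.2.2.2.2.2) ∧ build_grid_slot_defs (pvDiffWitness_build_grid_slot_defs.1) (pvDiffWitness_build_grid_slot_defs.2.1) (pvDiffWitness_build_grid_slot_defs.2.2.1) (pvDiffWitness_build_grid_slot_defs.2.2.2.1) (pvDiffWitness_build_grid_slot_defs.2.2.2.2.1) (pvDiffWitness_build_grid_slot_defs.2.2.2.2.2) = pvDiffWitnessOut_build_grid_slot_defs.1 ∧ build_grid_slot_defs_alt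 (pvDiffWitness_build_grid_slot_defs.1) (pvDiffWitness_build_grid_slot_defs.2.1) (pvDiffWitness_build_grid_slot_defs.2.2.1) (pvDiffWitness_build_grid_slot_defs.2.2.2.1) (pvDiffWitness_build_grid_slot_defs.2.2.2.2.1) (pvDiffWitness_build_grid_slot_defs.2.2.2.2.2) = pvDiffWitnessOut_build_grid_slot_defs.2 ∧ pvDiffWitnessOut_build_grid_slot_defs.1 ≠ pvDiffWitnessOut_build_grid_slot_defs.2
def Claim_exact_build_grid_slot_defs : Prop := ∀ (cols : Int) (rows : Int) (slot_size : Int) (slot_gap : Int) (origin_x : Int) (origin_z : Int), Dom_build_grid_slot_defs cols rows slot_size slot_gap origin_x origin_z → D_build_grid_slot_defs cols rows slot_size slot_gap origin_x origin_z → build_grid_slot_defs cols rows slot_size slot_gap origin_x origin_z ≠ build_grid_slot_defs_alt cols rows slot_size slot_gap origin_x origin_z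

-- ===== LEMMAS AND PROOFS =====

theorem pv_foldl_append_map {α β : Type} (g : α → β) :
    ∀ (l : List α) (init : List β),
      l.foldl (fun acc i => acc ++ [g i]) init = init ++ l.map g := by
  intro l
  induction l with
  | nil => simp
  | cons a l ih => intro init; simp [List.foldl, ih]

-- A as a map over its range
theorem pv_A_map (cols rows ss sg ox oz : Int) :
    build_grid_slot_defs cols rows ss sg ox oz
      = (PySem.List.pyRange 0 (cols * rows) 1).map
          (fun i => [("key", i),
                     ("x", ox + PySem.Int.mod i cols * (ss + sg)),
                     ("z", oz - PySem.Int.floordiv i cols * (ss + sg))]) := by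
  unfold build_grid_slot_defs
  exact pv_foldl_append_map _ _ []

-- inner fold of B: appends one row of items, keys counting up from k
theorem pv_B_inner (c : Nat) (f : Int → Int → List (String × Int)) :
    ∀ (L : List (List (String × Int))) (k : Int),
      (PySem.List.pyRange 0 (c : Int) 1).foldl
        (fun st col => (st.1 ++ [f st.2 col], st.2 + 1)) (L, k)
      = (L ++ (PySem.List.pyRange 0 (c : Int) 1).map (fun col => f (k + col) col), k + c) := by
  induction c with
  | zero => intro L k; simp [PySem.List.pyRange_one_eq_nil]
  | succ c ih =>
      intro L k
      have h : PySem.List.pyRange 0 ((c + 1 : Nat) : Int) 1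
          = PySem.List.pyRange 0 (c : Int) 1 ++ [(c : Int)] := by
        have := PySem.List.pyRange_one_succ_right (a := 0) (b := (c : Int)) (by positivity)
        simpa using this
      rw [h, List.foldl_append, ih, List.map_append]
      simp [List.foldl]
      omega

theorem pv_A_neg (cols rows ss sg ox oz : Int) (h : cols * rows ≤ 0) :
    build_grid_slot_defs cols rows ss sg ox oz = [] := by
  unfold build_grid_slot_defs
  simp [PySem.List.pyRange_one_eq_nil h]

theorem pv_B_rows_neg (cols rows ss sg ox oz : Int) (h : rows ≤ 0) :
    build_grid_slot_defs_alt cols rows ss sg ox oz = [] := by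
  unfold build_grid_slot_defs_alt
  rw [if_pos (Or.inr h)]

theorem pv_B_cols_neg (cols rows ss sg ox oz : Int) (h : cols ≤ 0) :
    build_grid_slot_defs_alt cols rows ss sg ox oz = [] := by
  unfold build_grid_slot_defs_alt
  rw [if_pos (Or.inl h)]

-- B with its lets unfolded
theorem pv_B_def (cols rows ss sg ox oz : Int)
    (h : ¬ (cols ≤ 0 ∨ rows ≤ 0)) :
    build_grid_slot_defs_alt cols rows ss sg ox oz
      = ((PySem.List.pyRange 0 rows 1).foldl
          (fun st row =>
            (PySem.List.pyRange 0 cols 1).foldl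
              (fun (st : List (List (String × Int)) × Int) col =>
                (st.1 ++ [[("key", st.2),
                           ("x", ox + col * (ss + sg)),
                           ("z", oz - row * (ss + sg))]], st.2 + 1))
              st)
          (([] : List (List (String × Int))), (0 : Int))).1 := by
  unfold build_grid_slot_defs_alt
  rw [if_neg h]

-- outer fold of B, for positive c: the whole grid, items as A decodes them
theorem pv_outer (c r : Nat) (hc : 0 < c) (ss sg ox oz : Int) :
    (PySem.List.pyRange 0 (r : Int) 1).foldl
      (fun st row =>
        (PySem.List.pyRange 0 (c : Int) 1).foldl
          (fun (st : List (List (String × Int)) × Int) col =>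
            (st.1 ++ [[("key", st.2),
                       ("x", ox + col * (ss + sg)),
                       ("z", oz - row * (ss + sg))]], st.2 + 1))
          st)
      (([] : List (List (String × Int))), (0 : Int))
    = ((PySem.List.pyRange 0 ((c : Int) * (r : Int)) 1).map
        (fun i => [("key", i),
                   ("x", ox + PySem.Int.mod i (c : Int) * (ss + sg)),
                   ("z", oz - PySem.Int.floordiv i (c : Int) * (ss + sg))]),
       (c : Int) * (r : Int)) := by
  induction r with
  | zero => simp [PySem.List.pyRange_one_eq_nil]
  | succ r ih =>
      have hr : ((r + 1 : Nat) : Int) = (r : Int) + 1 := by push_cast; ring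
      have hrows : PySem.List.pyRange 0 ((r + 1 : Nat) : Int) 1
          = PySem.List.pyRange 0 (r : Int) 1 ++ [(r : Int)] := by
        rw [hr]
        exact PySem.List.pyRange_one_succ_right (by positivity)
      rw [hrows, List.foldl_append, ih]
      simp only [List.foldl]
      rw [pv_B_inner c (fun k col => [("key", k),
            ("x", ox + col * (ss + sg)), ("z", oz - (r : Int) * (ss + sg))])]
      have hsplit : PySem.List.pyRange 0 ((c : Int) * ((r + 1 : Nat) : Int)) 1
          = PySem.List.pyRange 0 ((c : Int) * (r : Int)) 1
            ++ PySem.List.pyRange ((c : Int) * (r : Int)) ((c : Int) * (r : Int) + (c : Int)) 1 := by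
        have h1 : (0 : Int) ≤ (c : Int) * (r : Int) := by positivity
        have h2 : (c : Int) * (r : Int) ≤ (c : Int) * (r : Int) + (c : Int) := le_add_of_nonneg_right (by positivity)
        rw [hr, mul_add, mul_one]
        exact PySem.List.pyRange_one_append 0 ((c : Int) * (r : Int)) _ h1 h2
      rw [hsplit, List.map_append]
      refine Prod.ext ?_ ?_
      · simp only
        congr 1
        rw [PySem.List.pyRange_one (a := ((c : Int) * (r : Int))),
            PySem.List.pyRange_one (a := (0 : Int))]
        have hlen : ((c : Int) * (r : Int) + (c : Int) - (c : Int) * (r : Int)).toNat = c := by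
          omega
        have hlen0 : ((c : Int) - 0).toNat = c := by omega
        rw [hlen, hlen0, List.map_map, List.map_map]
        refine List.map_congr_left ?_
        intro k hk
        have hkc : k < c := List.mem_range.mp hk
        have hkc' : (k : Int) < (c : Int) := by exact_mod_cast hkc
        have hcpos : (0 : Int) < (c : Int) := by exact_mod_cast hc
        have hmod : PySem.Int.mod ((c : Int) * (r : Int) + (k : Int)) (c : Int) = (k : Int) := by
          rw [PySem.Int.mod_eq_emod_of_pos hcpos]
          rw [add_comm, Int.add_mul_emod_self_left]
          exact Int.emod_eq_of_lt (by positivity) hkc'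
        have hdiv : PySem.Int.floordiv ((c : Int) * (r : Int) + (k : Int)) (c : Int) = (r : Int) := by
          rw [PySem.Int.floordiv_eq_ediv_of_pos hcpos]
          rw [add_comm, Int.add_mul_ediv_left _ _ (by omega : (c : Int) ≠ 0)]
          rw [Int.ediv_eq_zero_of_lt (by positivity) hkc', zero_add]
        simp [hmod, hdiv]
      · simp only
        rw [hr]; ring

theorem pv_main (c r : Nat) (ss sg ox oz : Int) :
    build_grid_slot_defs (c : Int) (r : Int) ss sg ox oz
      = build_grid_slot_defs_alt (c : Int) (r : Int) ss sg ox oz := by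
  rcases Nat.eq_zero_or_pos c with hc | hc
  · subst hc
    rw [pv_A_neg _ _ _ _ _ _ (by simp), pv_B_cols_neg _ _ _ _ _ _ (by simp)]
  · rcases Nat.eq_zero_or_pos r with hr | hr
    · subst hr
      rw [pv_A_neg _ _ _ _ _ _ (by simp), pv_B_rows_neg _ _ _ _ _ _ (by simp)]
    · rw [pv_A_map, pv_B_def _ _ _ _ _ _ (by push_neg; exact ⟨by exact_mod_cast hc, by exact_mod_cast hr⟩), pv_outer c r hc ss sg ox oz]

theorem pv_unchanged (cols rows ss sg ox oz : Int)
    (h : ¬ (cols < 0 ∧ rows < 0)) :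
    build_grid_slot_defs cols rows ss sg ox oz
      = build_grid_slot_defs_alt cols rows ss sg ox oz := by
  rcases lt_or_ge cols 0 with hc | hc
  · have hr : 0 ≤ rows := by omega
    rw [pv_A_neg _ _ _ _ _ _ (by nlinarith), pv_B_cols_neg _ _ _ _ _ _ (by omega)]
  · rcases lt_or_ge rows 0 with hr | hr
    · rw [pv_A_neg _ _ _ _ _ _ (by nlinarith), pv_B_rows_neg _ _ _ _ _ _ (by omega)]
    · obtain ⟨c, rfl⟩ := Int.eq_ofNat_of_zero_le hc
      obtain ⟨r, rfl⟩ := Int.eq_ofNat_of_zero_le hr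
      exact pv_main c r ss sg ox oz

-- ===== VERDICT (by name: the statement is the Claim_ definition above) =====
theorem build_grid_slot_defs_spec : Claim_unchanged_build_grid_slot_defs := by
  intro cols rows ss sg ox oz _ hD
  exact pv_unchanged cols rows ss sg ox oz (by unfold D_build_grid_slot_defs at hD; exact hD)

theorem build_grid_slot_defs_changed : Claim_changed_build_grid_slot_defs := by
  unfold Claim_changed_build_grid_slot_defs; decide

theorem build_grid_slot_defs_tight : Claim_exact_build_grid_slot_defs := by
  intro cols rows ss sg ox oz _ hD
  obtain ⟨hc, hr⟩ := hD
  have hB : build_grid_slot_defs_alt cols rows ss sg ox oz = [] :=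
    pv_B_rows_neg _ _ _ _ _ _ (by omega)
  rw [hB, pv_A_map]
  intro hcontra
  have := congrArg List.length hcontra
  rw [List.length_map, PySem.List.length_pyRange_one] at this
  simp at this
  nlinarith
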